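-- pv_equiv track=rewrite | github.com/synowiec/elearning | questions/engine.py | slowest_progress
-- ===== SOURCE A (Python) =====
-- def slowest_progress(stats):
--     categories = []
--     progress = 100
--     for category in stats:
--         for subcategory in stats[category]:
--             sp = stats[category][subcategory]['progress']
--             if sp == 100:
--                 continue
--             elif sp < progress:
--                 progress = sp
--                 categories.clear()
--                 categories.append((category, subcategory))
--             elif sp == progress:
--                 categories.append((category, subcategory))
--     return categories
-- ===== SOURCE B (Python) =====
-- def slowest_progress(stats):
--     candidates = [sd['progress']
--                   for subs in stats.values()
--                   for sd in subs.values()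
--                   if sd['progress'] < 100]
--     if not candidates:
--         return []
--     m = min(candidates)
--     return [(c, s)
--             for c, subs in stats.items()
--             for s, sd in subs.items()
--             if sd['progress'] == m]
-- ===== Notes on version B (the rewrite author's own statement) =====
-- stated objective: simpler
-- what changed: Replaces the single-pass running-minimum loop with mutable clear/append state by two declarative passes: collect the progress values below 100, take their min, then filter the (category, subcategory) pairs equal to it.
-- outside the precondition, e.g. on slowest_progress({'c': {'s': {}}}): A raises KeyError, B raises KeyError
import Mathlib
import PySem

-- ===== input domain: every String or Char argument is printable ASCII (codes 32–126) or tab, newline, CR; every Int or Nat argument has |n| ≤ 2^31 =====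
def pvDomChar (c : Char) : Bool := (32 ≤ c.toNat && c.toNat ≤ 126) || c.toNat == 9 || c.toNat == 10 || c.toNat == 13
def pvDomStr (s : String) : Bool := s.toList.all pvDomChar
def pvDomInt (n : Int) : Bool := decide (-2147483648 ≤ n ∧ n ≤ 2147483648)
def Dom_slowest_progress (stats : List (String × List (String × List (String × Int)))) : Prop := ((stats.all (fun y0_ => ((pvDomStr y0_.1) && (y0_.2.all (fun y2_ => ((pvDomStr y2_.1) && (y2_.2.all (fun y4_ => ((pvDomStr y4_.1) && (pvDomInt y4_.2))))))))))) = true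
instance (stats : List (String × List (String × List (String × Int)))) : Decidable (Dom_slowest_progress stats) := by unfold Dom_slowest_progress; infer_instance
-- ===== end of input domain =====

-- B is a simpler two-pass decomposition (collect candidates < 100, take min, filter equal)
-- replacing A's single pass with a running minimum and clear/append state. Return values only.

-- ===== PORT A =====
-- literal transliteration of A's running-minimum loop; sd['progress'] is exact under
-- Pre_slowest_progress (every inner dict has the key "progress"), where Python does not raise.
def slowest_progress (stats : List (String × List (String × List (String × Int)))) : List (String × String) :=
  (stats.foldl (fun acc cs =>
      cs.2.foldl (fun acc2 sd =>
        let sp := ((PySem.Dict.mk sd.2).get? "progress").getD 0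
        if sp = 100 then acc2
        else if sp < acc2.2 then ([(cs.1, sd.1)], sp)
        else if sp = acc2.2 then (acc2.1 ++ [(cs.1, sd.1)], acc2.2)
        else acc2) acc)
    (([] : List (String × String)), (100 : Int))).1

-- ===== PORT B =====
-- transliteration of Source B: first comprehension gathers the progress values below 100;
-- if none, []; otherwise min, then a second comprehension keeps the pairs equal to it.
def slowest_progress_alt (stats : List (String × List (String × List (String × Int)))) : List (String × String) :=
  let candidates := stats.flatMap (fun cs =>
      (cs.2.map (fun sd => ((PySem.Dict.mk sd.2).get? "progress").getD 0)).filter (· < 100))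
  match candidates with
  | [] => []
  | v :: vs =>
    let m := vs.foldl min v
    stats.flatMap (fun cs =>
      (cs.2.filter (fun sd => ((PySem.Dict.mk sd.2).get? "progress").getD 0 = m)).map
        (fun sd => (cs.1, sd.1)))

-- ===== PRECONDITION & SPEC =====
-- Pre_ excludes exactly the inputs where some inner dict lacks the key "progress",
-- on which Python A (and B) raise KeyError.
def Pre_slowest_progress (stats : List (String × List (String × List (String × Int)))) : Prop :=
  ∀ cs ∈ stats, ∀ sd ∈ cs.2, "progress" ∈ sd.2.map Prod.fst
instance (stats : List (String × List (String × List (String × Int)))) : Decidable (Pre_slowest_progress stats) := by unfold Pre_slowest_progress; infer_instance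
def pvWitness_slowest_progress : (List (String × List (String × List (String × Int)))) :=
  [("math", [("algebra", [("progress", 40)]), ("geometry", [("progress", 100)])]),
   ("cs", [("lean", [("progress", 40)])])]

def Spec_slowest_progress (stats : List (String × List (String × List (String × Int)))) (out : List (String × String)) : Prop := out = slowest_progress_alt stats
instance (stats : List (String × List (String × List (String × Int)))) (out : List (String × String)) : Decidable (Spec_slowest_progress stats out) := by unfold Spec_slowest_progress; infer_instance

-- ===== CLAIM (what is proved, stated in full; the proofs are below) =====
def Claim_equal_slowest_progress : Prop := ∀ (stats : List (String × List (String × List (String × Int)))), Dom_slowest_progress stats → Pre_slowest_progress stats → Spec_slowest_progress stats (slowest_progress stats)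

-- ===== LEMMAS AND PROOFS =====

-- abbreviations used only by the proofs
def pvProg (sd : String × List (String × Int)) : Int :=
  ((PySem.Dict.mk sd.2).get? "progress").getD 0

def pvFlat (stats : List (String × List (String × List (String × Int)))) :
    List ((String × String) × Int) :=
  stats.flatMap (fun cs => cs.2.map (fun sd => ((cs.1, sd.1), pvProg sd)))

def pvStep (acc : List (String × String) × Int) (x : (String × String) × Int) :
    List (String × String) × Int :=
  if x.2 = 100 then acc
  else if x.2 < acc.2 then ([x.1], x.2)
  else if x.2 = acc.2 then (acc.1 ++ [x.1], acc.2)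
  else acc

-- the two-pass specification over the flattened list, with generalized accumulator/minimum
def pvSpecF (L : List ((String × String) × Int)) (cats : List (String × String)) (p : Int) :
    List (String × String) :=
  if (L.map Prod.snd).foldl min p = p then
    cats ++ (if p < 100 then (L.filter (fun x => x.2 = p)).map Prod.fst else [])
  else (L.filter (fun x => x.2 = (L.map Prod.snd).foldl min p)).map Prod.fst

theorem foldl_min_le {l : List Int} {v : Int} : l.foldl min v ≤ v := by
  induction l generalizing v with
  | nil => simp
  | cons a l ih => exact le_trans ih (min_le_left _ _)

theorem foldl_min_filter {l : List Int} {p v : Int} (h : v ≤ p) :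
    (l.filter (· < p)).foldl min v = l.foldl min v := by
  induction l generalizing v with
  | nil => rfl
  | cons a l ih =>
    by_cases ha : a < p
    · simp only [List.filter_cons, ha, decide_true, if_pos, List.foldl_cons]
      exact ih (le_trans (min_le_left _ _) h)
    · simp only [List.filter_cons, decide_eq_true_eq, ha, if_neg, not_false_iff, List.foldl_cons]
      rw [min_eq_left (le_trans h (not_lt.mp ha))]
      exact ih h

-- core induction: A's loop from any state (cats, p) with p ≤ 100 computes pvSpecF
theorem loop_eq_specF (L : List ((String × String) × Int)) :
    ∀ (cats : List (String × String)) (p : Int), p ≤ 100 →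
      (L.foldl pvStep (cats, p)).1 = pvSpecF L cats p := by
  induction L with
  | nil =>
    intro cats p _
    simp [pvSpecF]
  | cons x L ih =>
    intro cats p hp
    obtain ⟨xp, sp⟩ := x
    by_cases h100 : sp = 100
    · subst h100
      rw [List.foldl_cons, show pvStep (cats, p) ((xp, 100)) = (cats, p) by
        simp [pvStep]]
      rw [ih cats p hp]
      simp only [pvSpecF, List.map_cons, List.foldl_cons, List.filter_cons]
      simp only [min_eq_left hp]
      by_cases hm : (L.map Prod.snd).foldl min p = p
      · simp only [hm, if_pos]
        by_cases hplt : p < 100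
        · have : ¬ ((100 : Int) = p) := by omega
          simp [hplt, this]
        · simp [hplt]
      · have hmlt : (L.map Prod.snd).foldl min p < p :=
          lt_of_le_of_ne foldl_min_le hm
        have : ¬ ((100 : Int) = (L.map Prod.snd).foldl min p) := by omega
        simp [hm, this]
    · by_cases hlt : sp < p
      · rw [List.foldl_cons, show pvStep (cats, p) ((xp, sp)) = ([xp], sp) by
          simp [pvStep, h100, hlt]]
        rw [ih [xp] sp (by omega)]
        simp only [pvSpecF, List.map_cons, List.foldl_cons, List.filter_cons]
        simp only [min_eq_right (le_of_lt hlt)]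
        by_cases hm : (L.map Prod.snd).foldl min sp = sp
        · have hne : (L.map Prod.snd).foldl min sp ≠ p := by omega
          simp only [hm, if_pos]
          have hsp100 : sp < 100 := by omega
          simp [hsp100, show ¬ sp = p from by omega]
        · have hmlt : (L.map Prod.snd).foldl min sp < sp :=
            lt_of_le_of_ne foldl_min_le hm
          have hne : (L.map Prod.snd).foldl min sp ≠ p := by omega
          have hne2 : ¬ (sp = (L.map Prod.snd).foldl min sp) := by omega
          simp [hm, hne, hne2]
      · by_cases heq : sp = p
        · subst heq
          rw [List.foldl_cons, show pvStep (cats, sp) ((xp, sp)) = (cats ++ [xp], sp) by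
            simp [pvStep, h100]]
          rw [ih (cats ++ [xp]) sp hp]
          simp only [pvSpecF, List.map_cons, List.foldl_cons, List.filter_cons]
          simp only [min_self]
          by_cases hm : (L.map Prod.snd).foldl min sp = sp
          · have hsp100 : sp < 100 := by omega
            simp [hm, hsp100]
          · have hmlt : (L.map Prod.snd).foldl min sp < sp :=
              lt_of_le_of_ne foldl_min_le hm
            have : ¬ (sp = (L.map Prod.snd).foldl min sp) := by omega
            simp [hm, this]
        · rw [List.foldl_cons, show pvStep (cats, p) ((xp, sp)) = (cats, p) by
            simp [pvStep, h100, hlt, heq]]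
          rw [ih cats p hp]
          have hgt : p < sp := by omega
          simp only [pvSpecF, List.map_cons, List.foldl_cons, List.filter_cons]
          simp only [min_eq_left (le_of_lt hgt)]
          by_cases hm : (L.map Prod.snd).foldl min p = p
          · simp [hm, heq]
          · have hmlt : (L.map Prod.snd).foldl min p < p :=
              lt_of_le_of_ne foldl_min_le hm
            have : ¬ (sp = (L.map Prod.snd).foldl min p) := by omega
            simp [hm, this]

-- A's nested fold equals the fold of pvStep over the flattened list
theorem portA_eq_flat (stats : List (String × List (String × List (String × Int)))) :
    slowest_progress stats = ((pvFlat stats).foldl pvStep ([], 100)).1 := by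
  unfold slowest_progress pvFlat
  congr 1
  generalize (([] : List (String × String)), (100 : Int)) = acc
  induction stats generalizing acc with
  | nil => rfl
  | cons cs stats ih =>
    simp only [List.foldl_cons, List.flatMap_cons, List.foldl_append, List.foldl_map]
    rw [ih]
    rfl

-- B's two comprehensions expressed over the flattened list
theorem candidates_eq_flat (stats : List (String × List (String × List (String × Int)))) :
    stats.flatMap (fun cs =>
        (cs.2.map (fun sd => ((PySem.Dict.mk sd.2).get? "progress").getD 0)).filter (· < 100))
      = ((pvFlat stats).map Prod.snd).filter (· < 100) := by
  unfold pvFlat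
  induction stats with
  | nil => rfl
  | cons cs stats ih =>
    simp only [List.flatMap_cons, List.map_append, List.filter_append, List.map_map, ih]
    rfl

theorem secondPass_cat (c : String) (subs : List (String × List (String × Int))) (m : Int) :
    (subs.filter (fun sd => ((PySem.Dict.mk sd.2).get? "progress").getD 0 = m)).map
        (fun sd => (c, sd.1))
      = ((subs.map (fun sd => ((c, sd.1), pvProg sd))).filter (fun x => x.2 = m)).map Prod.fst := by
  induction subs with
  | nil => rfl
  | cons sd subs ih =>
    simp only [List.map_cons, List.filter_cons, pvProg]
    by_cases h : ((PySem.Dict.mk sd.2).get? "progress").getD 0 = m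
    · simp [h, ih, pvProg]
    · simp [h, ih, pvProg]

theorem secondPass_eq_flat (stats : List (String × List (String × List (String × Int)))) (m : Int) :
    stats.flatMap (fun cs =>
        (cs.2.filter (fun sd => ((PySem.Dict.mk sd.2).get? "progress").getD 0 = m)).map
          (fun sd => (cs.1, sd.1)))
      = ((pvFlat stats).filter (fun x => x.2 = m)).map Prod.fst := by
  unfold pvFlat
  induction stats with
  | nil => rfl
  | cons cs stats ih =>
    simp only [List.flatMap_cons, List.filter_append, List.map_append, ih]
    rw [secondPass_cat]

-- B's port equals pvSpecF over the flattened list with initial state ([], 100)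
theorem portB_eq_specF (stats : List (String × List (String × List (String × Int)))) :
    slowest_progress_alt stats = pvSpecF (pvFlat stats) [] 100 := by
  unfold slowest_progress_alt pvSpecF
  rw [candidates_eq_flat]
  rcases hc : ((pvFlat stats).map Prod.snd).filter (· < 100) with _ | ⟨v, vs⟩
  · have h0 : ((pvFlat stats).map Prod.snd).foldl min 100 = 100 := by
      rw [← foldl_min_filter (le_refl (100 : Int)), hc]; rfl
    rw [hc]
    simp [h0]
  · have hv : v < 100 := by
      have : v ∈ ((pvFlat stats).map Prod.snd).filter (· < 100) := by
        rw [hc]; exact List.mem_cons_self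
      simpa using (List.of_mem_filter this)
    have hmin : ((pvFlat stats).map Prod.snd).foldl min 100 = vs.foldl min v := by
      rw [← foldl_min_filter (le_refl (100 : Int)), hc, List.foldl_cons,
        min_eq_right (le_of_lt hv)]
    have hne : ((pvFlat stats).map Prod.snd).foldl min 100 ≠ 100 := by
      rw [hmin]
      have := @foldl_min_le vs v
      omega
    rw [hc]
    simp only [hmin] at hne ⊢
    rw [if_neg hne]
    exact secondPass_eq_flat stats (vs.foldl min v)

-- ===== VERDICT (by name: the statement is the Claim_ definition above) =====
theorem slowest_progress_spec : Claim_equal_slowest_progress := by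
  intro stats _ _
  unfold Spec_slowest_progress
  rw [portA_eq_flat, portB_eq_specF, loop_eq_specF _ _ _ (by norm_num)]
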